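-- pv_equiv track=rewrite | github.com/Khatisani/python-practice-003 | memoFORTEST.py | draw_number_triangle
-- ===== SOURCE A (Python) =====
-- def draw_number_triangle(height:int)->str:
--     """
--     This function draws a triangle of numbers with the given height.
--     i.e height = 4
--     returns:
--         1
--         2 3
--         4 5 6
--         7 8 9 10
--
--     Args:
--         height (int): height of the triangle.
--
--     Returns:
--         string : A string representation of the number triangle.
--     """
--     s = ""
--     n = 1
--     for i in range(1,height+1):
--         for j in range(i):
--             s += str(n) + " "
--             n+=1
--         s += "\n"
--
--     return s
-- ===== SOURCE B (Python) =====
-- def draw_number_triangle(height: int) -> str: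
--     rows = []
--     for i in range(1, height + 1):
--         start = i * (i - 1) // 2 + 1
--         rows.append(''.join(str(k) + ' ' for k in range(start, start + i)) + '\n')
--     return ''.join(rows)
-- ===== Notes on version B (the rewrite author's own statement) =====
-- stated objective: simpler
-- what changed: Each row's first number is computed directly by a triangular-number closed form and the row is built as a join over a computed range, eliminating the running counter threaded through the nested loops and the quadratic string concatenation.
import Mathlib
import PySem

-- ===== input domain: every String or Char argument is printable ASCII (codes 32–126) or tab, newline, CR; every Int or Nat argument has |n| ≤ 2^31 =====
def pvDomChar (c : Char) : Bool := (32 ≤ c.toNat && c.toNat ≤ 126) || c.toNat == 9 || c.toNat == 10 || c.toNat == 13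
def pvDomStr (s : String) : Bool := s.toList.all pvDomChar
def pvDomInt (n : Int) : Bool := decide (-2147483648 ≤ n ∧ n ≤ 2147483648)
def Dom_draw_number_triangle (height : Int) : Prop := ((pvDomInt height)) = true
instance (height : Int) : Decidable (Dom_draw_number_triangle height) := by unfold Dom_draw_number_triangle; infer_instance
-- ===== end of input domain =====

-- B builds each row from its closed-form first number i*(i-1)//2+1 and joins rows, instead of threading a running counter through nested loops (objective: simpler).

-- ===== PORT A =====
-- literal port of A: nested loops threading the accumulated string s and the counter n
def draw_number_triangle (height : Int) : String :=
  let res := (PySem.List.pyRange 1 (height + 1) 1).foldl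
    (fun (sn : String × Int) i =>
      let inner := (PySem.List.pyRange 0 i 1).foldl
        (fun (sn : String × Int) _ =>
          (sn.1 ++ PySem.Int.toStr sn.2 ++ " ", sn.2 + 1)) sn
      (inner.1 ++ "\n", inner.2))
    (("" : String), 1)
  res.1

-- ===== PORT B =====
-- one row: ''.join(str(k)+' ' for k in range(start, start+i)) + '\n' with start = i*(i-1)//2 + 1
def pvRowB (i : Int) : String :=
  let start := PySem.Int.floordiv (i * (i - 1)) 2 + 1
  String.join ((PySem.List.pyRange start (start + i) 1).map
      (fun k => PySem.Int.toStr k ++ " ")) ++ "\n"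

def draw_number_triangle_alt (height : Int) : String :=
  String.join ((PySem.List.pyRange 1 (height + 1) 1).map pvRowB)

-- ===== PRECONDITION & SPEC =====
def Spec_draw_number_triangle (height : Int) (out : String) : Prop := out = draw_number_triangle_alt height
instance (height : Int) (out : String) : Decidable (Spec_draw_number_triangle height out) := by unfold Spec_draw_number_triangle; infer_instance

-- ===== CLAIM (what is proved, stated in full; the proofs are below) =====
def Claim_equal_draw_number_triangle : Prop := ∀ (height : Int), Dom_draw_number_triangle height → Spec_draw_number_triangle height (draw_number_triangle height)

-- ===== LEMMAS AND PROOFS =====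

-- strings are equal when their character lists are
lemma pv_str_ext (a b : String) (h : a.toList = b.toList) : a = b := by
  have := congrArg String.ofList h
  simpa using this

-- String.ofList turns ++ on lists into ++ on strings
lemma pv_ofList_append (a b : List Char) : String.ofList (a ++ b) = String.ofList a ++ String.ofList b := by
  apply pv_str_ext; simp

-- ''.join over ofList'ed pieces is ofList of the flattened pieces
lemma pv_join_ofList (ls : List (List Char)) : ∀ (acc : List Char),
    (ls.map String.ofList).foldl (· ++ ·) (String.ofList acc) = String.ofList (acc ++ ls.flatten) := by
  induction ls with
  | nil => intro acc; simp
  | cons c t ih =>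
    intro acc
    simp only [List.map_cons, List.foldl_cons, ← pv_ofList_append, List.flatten_cons]
    rw [ih (acc ++ c)]
    simp [List.append_assoc]

-- ''.join, written as a fold starting from the empty string (= ofList [])
lemma pv_join_def (l : List String) : String.join l = l.foldl (· ++ ·) (String.ofList []) := by
  simp [String.join]

-- the character-list shadow of B's row builder
def pvRowC (i : Int) : List Char :=
  let start := PySem.Int.floordiv (i * (i - 1)) 2 + 1
  ((PySem.List.pyRange start (start + i) 1).flatMap
      (fun k => PySem.Int.toChars k ++ [' '])) ++ ['\n']

-- B's row builder is the ofList of its character-list shadow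
lemma pv_rowB_eq (i : Int) : pvRowB i = String.ofList (pvRowC i) := by
  apply pv_str_ext
  simp only [pvRowB, pvRowC]
  rw [show (PySem.List.pyRange (PySem.Int.floordiv (i * (i - 1)) 2 + 1)
        (PySem.Int.floordiv (i * (i - 1)) 2 + 1 + i) 1).map (fun k => PySem.Int.toStr k ++ " ")
      = ((PySem.List.pyRange (PySem.Int.floordiv (i * (i - 1)) 2 + 1)
        (PySem.Int.floordiv (i * (i - 1)) 2 + 1 + i) 1).map (fun k => PySem.Int.toChars k ++ [' '])).map String.ofList by
        rw [List.map_map]; apply List.map_congr_left; intro k _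
        apply pv_str_ext; simp [PySem.Int.toList_toStr]]
  rw [pv_join_def, pv_join_ofList]
  simp [List.flatMap]

-- A's inner loop on String state is the ofList image of the same loop on List Char state
lemma pv_bridge_inner (l : List Int) : ∀ (s : List Char) (n : Int),
    l.foldl (fun (sn : String × Int) _ =>
        (sn.1 ++ PySem.Int.toStr sn.2 ++ " ", sn.2 + 1)) (String.ofList s, n)
    = (String.ofList (l.foldl (fun (sn : List Char × Int) _ =>
        (sn.1 ++ PySem.Int.toChars sn.2 ++ [' '], sn.2 + 1)) (s, n)).1,
       (l.foldl (fun (sn : List Char × Int) _ =>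
        (sn.1 ++ PySem.Int.toChars sn.2 ++ [' '], sn.2 + 1)) (s, n)).2) := by
  induction l with
  | nil => intro s n; simp
  | cons i t ih =>
    intro s n
    simp only [List.foldl_cons]
    have hstep : String.ofList s ++ PySem.Int.toStr n ++ " "
        = String.ofList (s ++ PySem.Int.toChars n ++ [' ']) := by
      apply pv_str_ext; simp [PySem.Int.toList_toStr]
    rw [hstep]
    exact ih (s ++ PySem.Int.toChars n ++ [' ']) (n + 1)

-- A's outer loop on String state is the ofList image of the same loop on List Char state
lemma pv_bridge_outer (l : List Int) : ∀ (s : List Char) (n : Int),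
    l.foldl (fun (sn : String × Int) i =>
        let inner := (PySem.List.pyRange 0 i 1).foldl
          (fun (sn : String × Int) _ =>
            (sn.1 ++ PySem.Int.toStr sn.2 ++ " ", sn.2 + 1)) sn
        (inner.1 ++ "\n", inner.2)) (String.ofList s, n)
    = (String.ofList (l.foldl (fun (sn : List Char × Int) i =>
        let inner := (PySem.List.pyRange 0 i 1).foldl
          (fun (sn : List Char × Int) _ =>
            (sn.1 ++ PySem.Int.toChars sn.2 ++ [' '], sn.2 + 1)) sn
        (inner.1 ++ ['\n'], inner.2)) (s, n)).1,
       (l.foldl (fun (sn : List Char × Int) i =>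
        let inner := (PySem.List.pyRange 0 i 1).foldl
          (fun (sn : List Char × Int) _ =>
            (sn.1 ++ PySem.Int.toChars sn.2 ++ [' '], sn.2 + 1)) sn
        (inner.1 ++ ['\n'], inner.2)) (s, n)).2) := by
  induction l with
  | nil => intro s n; simp
  | cons i t ih =>
    intro s n
    simp only [List.foldl_cons]
    rw [pv_bridge_inner]
    have hnl : String.ofList ((PySem.List.pyRange 0 i 1).foldl
          (fun (sn : List Char × Int) _ =>
            (sn.1 ++ PySem.Int.toChars sn.2 ++ [' '], sn.2 + 1)) (s, n)).1 ++ "\n"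
        = String.ofList (((PySem.List.pyRange 0 i 1).foldl
          (fun (sn : List Char × Int) _ =>
            (sn.1 ++ PySem.Int.toChars sn.2 ++ [' '], sn.2 + 1)) (s, n)).1 ++ ['\n']) := by
      apply pv_str_ext; simp
    rw [hnl]
    exact ih _ _

-- A's inner loop (character level) writes exactly the numbers n..n+m-1 and advances the counter by m
lemma pv_inner (m : Nat) : ∀ (s : List Char) (n : Int),
    (PySem.List.pyRange 0 (m : Int) 1).foldl
      (fun (sn : List Char × Int) _ =>
        (sn.1 ++ PySem.Int.toChars sn.2 ++ [' '], sn.2 + 1)) (s, n)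
    = (s ++ (PySem.List.pyRange n (n + m) 1).flatMap (fun k => PySem.Int.toChars k ++ [' ']), n + m) := by
  induction m with
  | zero => intro s n; simp [PySem.List.pyRange_one_eq_nil]
  | succ m ih =>
    intro s n
    rw [show ((m + 1 : Nat) : Int) = (m : Int) + 1 by push_cast; ring,
      PySem.List.pyRange_one_succ_right (show (0 : Int) ≤ (m : Int) by positivity),
      show n + ((m : Int) + 1) = (n + (m : Int)) + 1 by ring,
      PySem.List.pyRange_one_succ_right (show n ≤ n + (m : Int) by omega),
      List.foldl_append, ih, List.flatMap_append]
    simp [List.append_assoc]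

-- pv_inner restated for an Int bound (row numbers are Ints in the outer loop)
lemma pv_inner' (i : Int) (hi : 0 ≤ i) : ∀ (s : List Char) (n : Int),
    (PySem.List.pyRange 0 i 1).foldl
      (fun (sn : List Char × Int) _ =>
        (sn.1 ++ PySem.Int.toChars sn.2 ++ [' '], sn.2 + 1)) (s, n)
    = (s ++ (PySem.List.pyRange n (n + i) 1).flatMap (fun k => PySem.Int.toChars k ++ [' ']), n + i) := by
  obtain ⟨m, rfl⟩ : ∃ m : Nat, i = (m : Int) := ⟨i.toNat, (Int.toNat_of_nonneg hi).symm⟩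
  exact pv_inner m

-- A's outer loop (character level) over rows 1..h, started at counter 1, produces exactly B's rows
-- (B's start for row i equals the counter, by the triangular-number identity); counter ends at h*(h+1)/2 + 1
lemma pv_outer (h : Nat) :
    (PySem.List.pyRange 1 ((h : Int) + 1) 1).foldl
      (fun (sn : List Char × Int) i =>
        let inner := (PySem.List.pyRange 0 i 1).foldl
          (fun (sn : List Char × Int) _ =>
            (sn.1 ++ PySem.Int.toChars sn.2 ++ [' '], sn.2 + 1)) sn
        (inner.1 ++ ['\n'], inner.2))
      (([] : List Char), 1)
    = (((PySem.List.pyRange 1 ((h : Int) + 1) 1).map pvRowC).flatten, ((h * (h + 1) / 2 : Nat) : Int) + 1) := by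
  induction h with
  | zero => simp [PySem.List.pyRange_one_eq_nil]
  | succ h ih =>
    rw [show ((h + 1 : Nat) : Int) + 1 = ((h : Int) + 1) + 1 by push_cast; ring,
      PySem.List.pyRange_one_succ_right (by omega)]
    simp only [List.foldl_append, ih, List.foldl_cons, List.foldl_nil, List.map_append,
      List.flatten_append, List.map_cons, List.map_nil, List.flatten_cons, List.flatten_nil]
    simp only [pv_inner' ((h : Int) + 1) (by positivity)]
    have hstart : PySem.Int.floordiv (((h : Int) + 1) * (((h : Int) + 1) - 1)) 2 + 1
        = ((h * (h + 1) / 2 : Nat) : Int) + 1 := by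
      have h1 : ((h : Int) + 1) * (((h : Int) + 1) - 1) = ((h * (h + 1) : Nat) : Int) := by
        push_cast; ring
      rw [h1, show (2 : Int) = ((2 : Nat) : Int) from rfl, PySem.Int.floordiv_natCast]
    have hexp : (h + 1) * (h + 1 + 1) = h * (h + 1) + 2 * (h + 1) := by ring
    obtain ⟨k, hk⟩ := Nat.even_mul_succ_self h
    have htri : h * (h + 1) / 2 + (h + 1) = (h + 1) * (h + 1 + 1) / 2 := by omega
    simp only [Prod.mk.injEq]
    constructor
    · simp only [pvRowC]
      rw [hstart]
      simp [List.append_assoc]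
    · rw [← htri]; push_cast; ring

-- ===== VERDICT (by name: the statement is the Claim_ definition above) =====
theorem draw_number_triangle_spec : Claim_equal_draw_number_triangle := by
  intro height _
  unfold Spec_draw_number_triangle draw_number_triangle draw_number_triangle_alt
  by_cases hle : height ≤ 0
  · rw [PySem.List.pyRange_one_eq_nil (by omega)]
    simp [String.join]
  · obtain ⟨h, rfl⟩ : ∃ h : Nat, height = (h : Int) :=
      ⟨height.toNat, (Int.toNat_of_nonneg (by omega)).symm⟩
    rw [pv_join_def,
      show (PySem.List.pyRange 1 ((h : Int) + 1) 1).map pvRowB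
        = ((PySem.List.pyRange 1 ((h : Int) + 1) 1).map pvRowC).map String.ofList by
          rw [List.map_map]; apply List.map_congr_left; intro i _; exact pv_rowB_eq i]
    rw [pv_join_ofList,
      show ("" : String) = String.ofList [] from by apply pv_str_ext; simp,
      pv_bridge_outer, pv_outer h]
    simp
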